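-- pv_equiv track=rewrite | github.com/micalon1/small_tasks | prog4.py | find_last_mismatch
-- ===== SOURCE A (Python) =====
-- def find_last_mismatch(s1,s2):
--     if s1 == s2:
--         return -1
--     else:
--         tracker = 0
--         for i in range(len(s1)):
--             if s1[i] != s2[i]:
--                 tracker = i
--     return tracker
-- ===== SOURCE B (Python) =====
-- def find_last_mismatch(s1, s2):
--     if s1 == s2:
--         return -1
--     for i in range(len(s1) - 1, -1, -1):
--         if s1[i] != s2[i]:
--             return i
--     return 0
-- ===== Notes on version B (the rewrite author's own statement) =====
-- stated objective: faster
-- what changed: Replaces the forward scan that keeps overwriting a last-mismatch accumulator with a backward scan that returns immediately at the first mismatch seen from the end.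
import Mathlib
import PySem

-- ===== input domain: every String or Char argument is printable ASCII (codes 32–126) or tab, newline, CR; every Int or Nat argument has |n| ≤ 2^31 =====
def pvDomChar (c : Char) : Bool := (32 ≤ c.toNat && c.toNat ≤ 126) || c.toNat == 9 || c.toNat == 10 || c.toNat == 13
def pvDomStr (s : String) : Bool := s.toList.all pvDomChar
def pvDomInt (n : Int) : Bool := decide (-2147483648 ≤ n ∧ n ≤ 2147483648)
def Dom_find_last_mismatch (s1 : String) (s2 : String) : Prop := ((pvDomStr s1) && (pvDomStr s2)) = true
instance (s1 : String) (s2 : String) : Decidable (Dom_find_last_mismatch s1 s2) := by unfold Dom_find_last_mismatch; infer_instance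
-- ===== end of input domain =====

-- B replaces A's forward scan with a last-mismatch accumulator by a backward scan
-- that returns at the first mismatch from the end (objective: alternative decomposition).

-- ===== PORT A =====
-- forward loop over range(len(s1)), keeping the last mismatching index in `tracker`
def find_last_mismatch (s1 : String) (s2 : String) : Int :=
  if s1 = s2 then -1
  else
    (PySem.List.pyRange 0 (PySem.Str.len s1) 1).foldl
      (fun tracker i =>
        if PySem.Str.pyGet? s1 i ≠ PySem.Str.pyGet? s2 i then i else tracker) 0

-- ===== PORT B =====
-- backward loop: index n-1, n-2, …, 0; return the first mismatching index, else 0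
def flmGoB (l1 l2 : List Char) : Nat → Int
  | 0 => 0
  | n + 1 => if l1[n]? ≠ l2[n]? then (n : Int) else flmGoB l1 l2 n

def find_last_mismatch_alt (s1 : String) (s2 : String) : Int :=
  if s1 = s2 then -1
  else flmGoB s1.toList s2.toList s1.toList.length

-- ===== PRECONDITION & SPEC =====
-- Pre_ excludes exactly the inputs where Python A raises IndexError:
-- s1 ≠ s2 with len(s1) > len(s2) (the loop indexes s2[i] past its end).
def Pre_find_last_mismatch (s1 : String) (s2 : String) : Prop :=
  s1 = s2 ∨ s1.toList.length ≤ s2.toList.length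
instance (s1 : String) (s2 : String) : Decidable (Pre_find_last_mismatch s1 s2) := by
  unfold Pre_find_last_mismatch; infer_instance

def pvWitness_find_last_mismatch : String × String := ("abc", "abd")

def Spec_find_last_mismatch (s1 : String) (s2 : String) (out : Int) : Prop := out = find_last_mismatch_alt s1 s2
instance (s1 : String) (s2 : String) (out : Int) : Decidable (Spec_find_last_mismatch s1 s2 out) := by unfold Spec_find_last_mismatch; infer_instance

-- ===== CLAIM (what is proved, stated in full; the proofs are below) =====
def Claim_equal_find_last_mismatch : Prop := ∀ (s1 : String) (s2 : String), Dom_find_last_mismatch s1 s2 → Pre_find_last_mismatch s1 s2 → Spec_find_last_mismatch s1 s2 (find_last_mismatch s1 s2)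

-- ===== LEMMAS AND PROOFS =====

-- A's fold over range(0, n) with a last-mismatch accumulator equals B's backward scan.
theorem flm_fold_eq_go (s1 s2 : String) (n : Nat) :
    (PySem.List.pyRange 0 (n : Int) 1).foldl
      (fun tracker i =>
        if PySem.Str.pyGet? s1 i ≠ PySem.Str.pyGet? s2 i then i else tracker) 0
    = flmGoB s1.toList s2.toList n := by
  induction n with
  | zero => simp [flmGoB]
  | succ n ih =>
      have h : PySem.List.pyRange 0 ((n : Int) + 1) 1
          = PySem.List.pyRange 0 (n : Int) 1 ++ [(n : Int)] :=
        PySem.List.pyRange_one_succ_right (by exact_mod_cast Nat.zero_le n)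
      have hcast : ((n + 1 : Nat) : Int) = (n : Int) + 1 := by push_cast; ring
      rw [hcast, h, List.foldl_append, ih]
      simp [flmGoB]

-- ===== VERDICT (by name: the statement is the Claim_ definition above) =====
theorem find_last_mismatch_spec : Claim_equal_find_last_mismatch := by
  intro s1 s2 _ _
  unfold Spec_find_last_mismatch find_last_mismatch find_last_mismatch_alt
  by_cases h : s1 = s2
  · simp [h]
  · simp only [h, if_false]
    rw [PySem.Str.len_eq, flm_fold_eq_go]
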